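-- pv_equiv track=rewrite | github.com/dheeraj-19/ArtficialIntelligence | Games/Raichu/raichu.py | find_peices
-- ===== SOURCE A (Python) =====
-- def find_peices(mat):
--
--     white_pichus = []
--     white_pikachus = []
--     white_raichus = []
--     black_pichus = []
--     black_pikachus = []
--     black_raichus = []
--
--     for i in range(len(mat)):
--         for j in range(len(mat[i])):
--             if mat[i][j] == 'w':
--                 white_pichus.append((i,j))
--             elif mat[i][j] == 'W':
--                 white_pikachus.append((i,j))
--             elif mat[i][j] == '@':
--                 white_raichus.append((i,j))
--             elif mat[i][j] == 'b':
--                 black_pichus.append((i,j))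
--             elif mat[i][j] == 'B':
--                 black_pikachus.append((i,j))
--             elif mat[i][j] == '$':
--                 black_raichus.append((i,j))
--
--     return(white_pichus,white_pikachus,white_raichus,black_pichus,black_pikachus,black_raichus)
-- ===== SOURCE B (Python) =====
-- def _collect(mat, ch):
--     return [(i, j) for i, row in enumerate(mat) for j, c in enumerate(row) if c == ch]
--
-- def find_peices(mat):
--     return (_collect(mat, 'w'), _collect(mat, 'W'), _collect(mat, '@'),
--             _collect(mat, 'b'), _collect(mat, 'B'), _collect(mat, '$'))
-- ===== Notes on version B (the rewrite author's own statement) =====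
-- stated objective: idiomatic
-- what changed: Replaces the single index-based loop with six-way branch dispatch by six independent enumerate-driven filtered comprehensions (one per piece character) returned as a tuple.
import Mathlib
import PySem

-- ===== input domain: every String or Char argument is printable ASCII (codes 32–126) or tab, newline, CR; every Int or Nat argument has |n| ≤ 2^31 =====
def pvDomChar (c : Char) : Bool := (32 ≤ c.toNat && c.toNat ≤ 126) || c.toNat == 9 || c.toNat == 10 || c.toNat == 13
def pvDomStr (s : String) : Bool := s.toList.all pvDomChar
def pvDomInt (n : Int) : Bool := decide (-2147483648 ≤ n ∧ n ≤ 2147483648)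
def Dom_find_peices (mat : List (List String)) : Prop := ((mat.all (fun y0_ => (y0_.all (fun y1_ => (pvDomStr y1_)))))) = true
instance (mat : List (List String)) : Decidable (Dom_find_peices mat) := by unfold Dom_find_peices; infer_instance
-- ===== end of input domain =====

-- B replaces A's single bucketing loop (index loops + six-way elif dispatch) with six
-- independent enumerate-driven filtered scans, one per piece character (idiomatic; not faster).

-- ===== PORT A =====
-- literal transliteration: for i in range(len(mat)): for j in range(len(mat[i])): elif-chain appends
def find_peices (mat : List (List String)) : (List (Int × Int)) × (List (Int × Int)) × (List (Int × Int)) × (List (Int × Int)) × (List (Int × Int)) × (List (Int × Int)) :=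
  (PySem.List.pyRange 0 (mat.length : Int) 1).foldl (fun st i =>
    (PySem.List.pyRange 0 ((PySem.List.pyGetD mat i []).length : Int) 1).foldl (fun st j =>
      let c := PySem.List.pyGetD (PySem.List.pyGetD mat i []) j ""
      if c = "w" then (st.1 ++ [(i, j)], st.2.1, st.2.2.1, st.2.2.2.1, st.2.2.2.2.1, st.2.2.2.2.2)
      else if c = "W" then (st.1, st.2.1 ++ [(i, j)], st.2.2.1, st.2.2.2.1, st.2.2.2.2.1, st.2.2.2.2.2)
      else if c = "@" then (st.1, st.2.1, st.2.2.1 ++ [(i, j)], st.2.2.2.1, st.2.2.2.2.1, st.2.2.2.2.2)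
      else if c = "b" then (st.1, st.2.1, st.2.2.1, st.2.2.2.1 ++ [(i, j)], st.2.2.2.2.1, st.2.2.2.2.2)
      else if c = "B" then (st.1, st.2.1, st.2.2.1, st.2.2.2.1, st.2.2.2.2.1 ++ [(i, j)], st.2.2.2.2.2)
      else if c = "$" then (st.1, st.2.1, st.2.2.1, st.2.2.2.1, st.2.2.2.2.1, st.2.2.2.2.2 ++ [(i, j)])
      else st) st)
    ([], [], [], [], [], [])

-- ===== PORT B =====
-- '[(i, j) for i, row in enumerate(mat) for j, c in enumerate(row) if c == ch]'
def pvCollect (mat : List (List String)) (ch : String) : List (Int × Int) :=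
  (PySem.List.enumerate mat 0).flatMap (fun p =>
    ((PySem.List.enumerate p.2 0).filter (fun q => q.2 == ch)).map (fun q => (p.1, q.1)))

def find_peices_alt (mat : List (List String)) : (List (Int × Int)) × (List (Int × Int)) × (List (Int × Int)) × (List (Int × Int)) × (List (Int × Int)) × (List (Int × Int)) :=
  (pvCollect mat "w", pvCollect mat "W", pvCollect mat "@",
   pvCollect mat "b", pvCollect mat "B", pvCollect mat "$")

-- ===== PRECONDITION & SPEC =====
def Spec_find_peices (mat : List (List String)) (out : (List (Int × Int)) × (List (Int × Int)) × (List (Int × Int)) × (List (Int × Int)) × (List (Int × Int)) × (List (Int × Int))) : Prop := out = find_peices_alt mat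
instance (mat : List (List String)) (out : (List (Int × Int)) × (List (Int × Int)) × (List (Int × Int)) × (List (Int × Int)) × (List (Int × Int)) × (List (Int × Int))) : Decidable (Spec_find_peices mat out) := by
  unfold Spec_find_peices
  have h : DecidableEq (List (Int × Int)) := inferInstance
  exact @instDecidableEqProd _ _ h (@instDecidableEqProd _ _ h (@instDecidableEqProd _ _ h (@instDecidableEqProd _ _ h (@instDecidableEqProd _ _ h h)))) out (find_peices_alt mat)

-- ===== CLAIM (what is proved, stated in full; the proofs are below) =====
def Claim_equal_find_peices : Prop := ∀ (mat : List (List String)), Dom_find_peices mat → Spec_find_peices mat (find_peices mat)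

-- ===== LEMMAS AND PROOFS =====

-- the inner-row picks of B, with a generalized enumerate start
def pvRowPick (i : Int) (row : List String) (s : Int) (ch : String) : List (Int × Int) :=
  ((PySem.List.enumerate row s).filter (fun q => q.2 == ch)).map (fun q => (i, q.1))

lemma pvRowPick_cons (i : Int) (c : String) (row : List String) (s : Int) (ch : String) :
    pvRowPick i (c :: row) s ch =
      (if c == ch then [(i, s)] else []) ++ pvRowPick i row (s + 1) ch := by
  simp only [pvRowPick, PySem.List.enumerate_cons, List.filter_cons]
  by_cases h : c == ch <;> simp [h]

-- the inner loop of A, over an enumerated row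
def pvInner (i : Int) (st : (List (Int × Int)) × (List (Int × Int)) × (List (Int × Int)) × (List (Int × Int)) × (List (Int × Int)) × (List (Int × Int))) (row : List String) (s : Int) :
    (List (Int × Int)) × (List (Int × Int)) × (List (Int × Int)) × (List (Int × Int)) × (List (Int × Int)) × (List (Int × Int)) :=
  (PySem.List.enumerate row s).foldl (fun st p =>
      let c := p.2
      if c = "w" then (st.1 ++ [(i, p.1)], st.2.1, st.2.2.1, st.2.2.2.1, st.2.2.2.2.1, st.2.2.2.2.2)
      else if c = "W" then (st.1, st.2.1 ++ [(i, p.1)], st.2.2.1, st.2.2.2.1, st.2.2.2.2.1, st.2.2.2.2.2)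
      else if c = "@" then (st.1, st.2.1, st.2.2.1 ++ [(i, p.1)], st.2.2.2.1, st.2.2.2.2.1, st.2.2.2.2.2)
      else if c = "b" then (st.1, st.2.1, st.2.2.1, st.2.2.2.1 ++ [(i, p.1)], st.2.2.2.2.1, st.2.2.2.2.2)
      else if c = "B" then (st.1, st.2.1, st.2.2.1, st.2.2.2.1, st.2.2.2.2.1 ++ [(i, p.1)], st.2.2.2.2.2)
      else if c = "$" then (st.1, st.2.1, st.2.2.1, st.2.2.2.1, st.2.2.2.2.1, st.2.2.2.2.2 ++ [(i, p.1)])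
      else st) st

lemma pvInner_eq (i : Int) (row : List String) : ∀ (s : Int) (st : _),
    pvInner i st row s =
      (st.1 ++ pvRowPick i row s "w", st.2.1 ++ pvRowPick i row s "W",
       st.2.2.1 ++ pvRowPick i row s "@", st.2.2.2.1 ++ pvRowPick i row s "b",
       st.2.2.2.2.1 ++ pvRowPick i row s "B", st.2.2.2.2.2 ++ pvRowPick i row s "$") := by
  induction row with
  | nil => intro s st; simp [pvInner, pvRowPick, PySem.List.enumerate_nil]
  | cons c row ih =>
    intro s st
    simp only [pvInner, PySem.List.enumerate_cons, List.foldl_cons] at *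
    rw [ih]
    simp only [pvRowPick_cons]
    by_cases h1 : c = "w"
    · simp [h1]
    · by_cases h2 : c = "W"
      · simp [h2]
      · by_cases h3 : c = "@"
        · simp [h3]
        · by_cases h4 : c = "b"
          · simp [h4]
          · by_cases h5 : c = "B"
            · simp [h5]
            · by_cases h6 : c = "$"
              · simp [h6]
              · simp [h1, h2, h3, h4, h5, h6]

-- B's collect with a generalized outer enumerate start
def pvCollectFrom (mat : List (List String)) (s : Int) (ch : String) : List (Int × Int) :=
  (PySem.List.enumerate mat s).flatMap (fun p => pvRowPick p.1 p.2 0 ch)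

-- the outer loop of A, over an enumerated matrix
lemma pvOuter_eq (mat : List (List String)) : ∀ (s : Int) (st : _),
    (PySem.List.enumerate mat s).foldl (fun st p => pvInner p.1 st p.2 0) st =
      (st.1 ++ pvCollectFrom mat s "w", st.2.1 ++ pvCollectFrom mat s "W",
       st.2.2.1 ++ pvCollectFrom mat s "@", st.2.2.2.1 ++ pvCollectFrom mat s "b",
       st.2.2.2.2.1 ++ pvCollectFrom mat s "B", st.2.2.2.2.2 ++ pvCollectFrom mat s "$") := by
  induction mat with
  | nil => intro s st; simp [pvCollectFrom, PySem.List.enumerate_nil]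
  | cons row mat ih =>
    intro s st
    simp only [PySem.List.enumerate_cons, List.foldl_cons]
    rw [pvInner_eq, ih]
    simp [pvCollectFrom, PySem.List.enumerate_cons]

-- A's pyRange-indexed loops are the enumerate loops above
lemma pvFold_range_enum {α β : Type} (xs : List α) (d : α) (F : β → Int → α → β) (init : β) :
    (PySem.List.pyRange 0 (xs.length : Int) 1).foldl (fun st j => F st j (PySem.List.pyGetD xs j d)) init
      = (PySem.List.enumerate xs 0).foldl (fun st p => F st p.1 p.2) init := by
  rw [PySem.List.enumerate_eq_map_pyRange (d := d), List.foldl_map]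
  simp [PySem.List.len]

-- ===== VERDICT (by name: the statement is the Claim_ definition above) =====
theorem find_peices_spec : Claim_equal_find_peices := by
  intro mat _
  show find_peices mat = find_peices_alt mat
  unfold find_peices
  rw [pvFold_range_enum mat [] (fun st i row =>
    (PySem.List.pyRange 0 (row.length : Int) 1).foldl (fun st j =>
      let c := PySem.List.pyGetD row j ""
      if c = "w" then (st.1 ++ [(i, j)], st.2.1, st.2.2.1, st.2.2.2.1, st.2.2.2.2.1, st.2.2.2.2.2)
      else if c = "W" then (st.1, st.2.1 ++ [(i, j)], st.2.2.1, st.2.2.2.1, st.2.2.2.2.1, st.2.2.2.2.2)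
      else if c = "@" then (st.1, st.2.1, st.2.2.1 ++ [(i, j)], st.2.2.2.1, st.2.2.2.2.1, st.2.2.2.2.2)
      else if c = "b" then (st.1, st.2.1, st.2.2.1, st.2.2.2.1 ++ [(i, j)], st.2.2.2.2.1, st.2.2.2.2.2)
      else if c = "B" then (st.1, st.2.1, st.2.2.1, st.2.2.2.1, st.2.2.2.2.1 ++ [(i, j)], st.2.2.2.2.2)
      else if c = "$" then (st.1, st.2.1, st.2.2.1, st.2.2.2.1, st.2.2.2.2.1, st.2.2.2.2.2 ++ [(i, j)])
      else st) st)]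
  have hinner : ∀ (st : _) (p : Int × List String),
      (PySem.List.pyRange 0 (p.2.length : Int) 1).foldl (fun st j =>
        let c := PySem.List.pyGetD p.2 j ""
        if c = "w" then (st.1 ++ [(p.1, j)], st.2.1, st.2.2.1, st.2.2.2.1, st.2.2.2.2.1, st.2.2.2.2.2)
        else if c = "W" then (st.1, st.2.1 ++ [(p.1, j)], st.2.2.1, st.2.2.2.1, st.2.2.2.2.1, st.2.2.2.2.2)
        else if c = "@" then (st.1, st.2.1, st.2.2.1 ++ [(p.1, j)], st.2.2.2.1, st.2.2.2.2.1, st.2.2.2.2.2)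
        else if c = "b" then (st.1, st.2.1, st.2.2.1, st.2.2.2.1 ++ [(p.1, j)], st.2.2.2.2.1, st.2.2.2.2.2)
        else if c = "B" then (st.1, st.2.1, st.2.2.1, st.2.2.2.1, st.2.2.2.2.1 ++ [(p.1, j)], st.2.2.2.2.2)
        else if c = "$" then (st.1, st.2.1, st.2.2.1, st.2.2.2.1, st.2.2.2.2.1, st.2.2.2.2.2 ++ [(p.1, j)])
        else st) st = pvInner p.1 st p.2 0 := by
    intro st p
    unfold pvInner
    rw [pvFold_range_enum p.2 "" (fun st j c =>
      if c = "w" then (st.1 ++ [(p.1, j)], st.2.1, st.2.2.1, st.2.2.2.1, st.2.2.2.2.1, st.2.2.2.2.2)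
      else if c = "W" then (st.1, st.2.1 ++ [(p.1, j)], st.2.2.1, st.2.2.2.1, st.2.2.2.2.1, st.2.2.2.2.2)
      else if c = "@" then (st.1, st.2.1, st.2.2.1 ++ [(p.1, j)], st.2.2.2.1, st.2.2.2.2.1, st.2.2.2.2.2)
      else if c = "b" then (st.1, st.2.1, st.2.2.1, st.2.2.2.1 ++ [(p.1, j)], st.2.2.2.2.1, st.2.2.2.2.2)
      else if c = "B" then (st.1, st.2.1, st.2.2.1, st.2.2.2.1, st.2.2.2.2.1 ++ [(p.1, j)], st.2.2.2.2.2)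
      else if c = "$" then (st.1, st.2.1, st.2.2.1, st.2.2.2.1, st.2.2.2.2.1, st.2.2.2.2.2 ++ [(p.1, j)])
      else st) st]
  simp only [hinner]
  rw [pvOuter_eq]
  simp [find_peices_alt, pvCollect, pvCollectFrom, pvRowPick]
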